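-- pv_equiv track=rewrite | github.com/omerts/sefaria-semantic-server | preprocess/chunker.py | number_to_hebrew
-- ===== SOURCE A (Python) =====
-- HEBREW_NUMBERS = [
--     (400, "ת"),
--     (300, "ש"),
--     (200, "ר"),
--     (100, "ק"),
--     (90, "צ"),
--     (80, "פ"),
--     (70, "ע"),
--     (60, "ס"),
--     (50, "נ"),
--     (40, "מ"),
--     (30, "ל"),
--     (20, "כ"),
--     (10, "י"),
--     (9, "ט"),
--     (8, "ח"),
--     (7, "ז"),
--     (6, "ו"),
--     (5, "ה"),
--     (4, "ד"),
--     (3, "ג"),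
--     (2, "ב"),
--     (1, "א"),
-- ]
--
-- def number_to_hebrew(n: int) -> str:
--     """
--     Converts a number to Hebrew numeral (1-999)
--
--     Args:
--         n: Number to convert (1-999)
--
--     Returns:
--         Hebrew numeral string
--     """
--     if n <= 0 or n > 999:
--         raise ValueError("supported range: 1–999")
--
--     result = ""
--     num = n
--
--     for value, letter in HEBREW_NUMBERS:
--         while num >= value:
--             result += letter
--             num -= value
--
--     # Avoid special cases like forming השם (e.g., 15, 16)
--     if result == "יה":
--         result = "טו"
--     elif result == "יו":
--         result = "טז"
--
--     return result
-- ===== SOURCE B (Python) =====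
-- HUNDREDS = ["ק", "ר", "ש", "ת", "תק", "תר", "תש", "תת", "תתק"]
-- TENS = ["י", "כ", "ל", "מ", "נ", "ס", "ע", "פ", "צ"]
-- UNITS = ["א", "ב", "ג", "ד", "ה", "ו", "ז", "ח", "ט"]
--
-- def number_to_hebrew(n: int) -> str:
--     if n <= 0 or n > 999:
--         raise ValueError("supported range: 1–999")
--     h, t, u = n // 100, (n % 100) // 10, n % 10
--     result = (HUNDREDS[h - 1] if h else "") + (TENS[t - 1] if t else "") + (UNITS[u - 1] if u else "")
--     if result == "יה":
--         return "טו"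
--     if result == "יו":
--         return "טז"
--     return result
-- ===== Notes on version B (the rewrite author's own statement) =====
-- stated objective: simpler
-- what changed: Replaced the greedy repeated-subtraction loop over the full value table with direct decimal-digit decomposition (hundreds, tens, units) and three small lookup tables, keeping the same exact-string remap of the two sacred-name forms.
import Mathlib
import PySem

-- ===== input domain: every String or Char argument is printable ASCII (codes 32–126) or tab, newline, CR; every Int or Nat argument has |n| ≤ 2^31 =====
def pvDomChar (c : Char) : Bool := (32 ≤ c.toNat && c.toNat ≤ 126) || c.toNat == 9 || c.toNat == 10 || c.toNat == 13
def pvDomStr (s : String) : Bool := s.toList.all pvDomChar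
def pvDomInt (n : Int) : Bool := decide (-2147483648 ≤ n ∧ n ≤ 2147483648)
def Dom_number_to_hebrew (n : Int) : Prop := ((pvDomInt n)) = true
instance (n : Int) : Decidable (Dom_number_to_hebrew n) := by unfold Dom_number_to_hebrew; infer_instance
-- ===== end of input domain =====

-- B replaces A's greedy subtraction loop by decimal-digit table lookups; objective: simpler.

-- ===== PORT A =====
def pvHebrewNumbers : List (Int × String) :=
  [(400, "ת"), (300, "ש"), (200, "ר"), (100, "ק"), (90, "צ"), (80, "פ"), (70, "ע"),
   (60, "ס"), (50, "נ"), (40, "מ"), (30, "ל"), (20, "כ"), (10, "י"), (9, "ט"),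
   (8, "ח"), (7, "ז"), (6, "ו"), (5, "ה"), (4, "ד"), (3, "ג"), (2, "ב"), (1, "א")]

-- inner 'while num >= value' loop; fuel = num.toNat + 1 bounds the iteration count
-- exactly since every value in the table is ≥ 1
def pvAWhile (fuel : Nat) (value : Int) (letter : String) (result : String) (num : Int) :
    String × Int :=
  match fuel with
  | 0 => (result, num)
  | fuel + 1 =>
    if num ≥ value then pvAWhile fuel value letter (result ++ letter) (num - value)
    else (result, num)

def pvAFor : List (Int × String) → String → Int → String × Int
  | [], result, num => (result, num)
  | (value, letter) :: rest, result, num =>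
    let (result', num') := pvAWhile (num.toNat + 1) value letter result num
    pvAFor rest result' num'

def number_to_hebrew (n : Int) : String :=
  -- range check: Python raises ValueError outside 1..999 (excluded by Pre_)
  let result := (pvAFor pvHebrewNumbers "" n).1
  if result = "יה" then "טו"
  else if result = "יו" then "טז"
  else result

-- ===== PORT B =====
def pvHundreds : List String := ["ק", "ר", "ש", "ת", "תק", "תר", "תש", "תת", "תתק"]
def pvTens : List String := ["י", "כ", "ל", "מ", "נ", "ס", "ע", "פ", "צ"]
def pvUnits : List String := ["א", "ב", "ג", "ד", "ה", "ו", "ז", "ח", "ט"]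

def number_to_hebrew_alt (n : Int) : String :=
  let h := PySem.Int.floordiv n 100
  let t := PySem.Int.floordiv (PySem.Int.mod n 100) 10
  let u := PySem.Int.mod n 10
  let result :=
    (if h ≠ 0 then (PySem.List.pyGet? pvHundreds (h - 1)).getD "" else "") ++
    (if t ≠ 0 then (PySem.List.pyGet? pvTens (t - 1)).getD "" else "") ++
    (if u ≠ 0 then (PySem.List.pyGet? pvUnits (u - 1)).getD "" else "")
  if result = "יה" then "טו"
  else if result = "יו" then "טז"
  else result

-- ===== PRECONDITION & SPEC =====
-- exactly the inputs on which A returns (outside 1..999 it raises ValueError)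
def Pre_number_to_hebrew (n : Int) : Prop := 1 ≤ n ∧ n ≤ 999
instance (n : Int) : Decidable (Pre_number_to_hebrew n) := by unfold Pre_number_to_hebrew; infer_instance
def pvWitness_number_to_hebrew : Int := (515)
def Spec_number_to_hebrew (n : Int) (out : String) : Prop := out = number_to_hebrew_alt n
instance (n : Int) (out : String) : Decidable (Spec_number_to_hebrew n out) := by unfold Spec_number_to_hebrew; infer_instance

-- ===== CLAIM =====
def Claim_equal_number_to_hebrew : Prop := ∀ (n : Int), Dom_number_to_hebrew n → Pre_number_to_hebrew n → Spec_number_to_hebrew n (number_to_hebrew n)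

-- ===== LEMMAS AND PROOFS =====
set_option maxRecDepth 100000 in
-- the whole (finite) domain, checked by the kernel
theorem pv_all_small : ∀ m ∈ List.range 1000,
    number_to_hebrew ((m : Int)) = number_to_hebrew_alt ((m : Int)) := by decide

-- ===== VERDICT =====
theorem number_to_hebrew_spec : Claim_equal_number_to_hebrew := by
  intro n _ hpre
  obtain ⟨h1, h2⟩ := hpre
  unfold Spec_number_to_hebrew
  have hn : n = ((n.toNat : Nat) : Int) := (Int.toNat_of_nonneg (by omega)).symm
  have hm : n.toNat ∈ List.range 1000 := by
    rw [List.mem_range]; omega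
  rw [hn]
  exact pv_all_small n.toNat hm
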